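-- pv_equiv track=rewrite | github.com/DNA-and-Natural-Algorithms-Group/multistrand | src/interface/utils.py | pairType
-- ===== SOURCE A (Python) =====
-- def generatePairing(dotParen, stack, offset, output) -> None:
--     """
--     Utility function.
--     """
--     index = 1
--     for c in dotParen:
--         if c == '(':
--             # pushing the first end of the basepair
--             stack.append(offset + index)
--         elif c == ')':
--             # popping the stack, setting two locations
--             currIndex = offset + index
--             otherIndex = stack.pop()
--
--             output[currIndex - 1] = otherIndex
--             output[otherIndex - 1] = currIndex
--         elif not c == '.':
--             raise Warning('generatePairing: There is an error in the dot paren structure.')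
--         index += 1
--
-- def pairType(ids, structs):
--     """
--     Given identifiers and dot-parens for a complex,
--     pairType returns a unique identifier for that secondary structure.
--     """
--     idList = ids.split(',')
--     if all(id_.count(":") == 0 for id_ in idList):
--         pass
--     elif all(id_.count(":") == 1 for id_ in idList):
--         nList = []
--         for id_ in idList:
--             id_ = id_.split(":")[1]
--             nList.append(id_)
--         idList = nList
--     else:
--         raise ValueError("Unsupported strand labelling.")
--
--     dotParens = structs.split('+')
--     N = len(dotParens)
--
--     # the new ordering, for example: 3 0 1 2, so that idList[3] < idList[0] < idList[1] < idList[2]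
--     ordering = sorted(range(len(idList)), key=idList.__getitem__)
--
--     idString = ''
--
--     newLengths = [len(dotParens[ordering[i]]) for i in range(N)]
--     newOffsets = [ sum(newLengths[0:i]) for i in range(N)]  # the offsets under the new ordering
--     offsets = [0, ] * N  # the new offsets under the old ordering
--     for i in range(N):
--         newPosition = ordering[i]
--         offsets[newPosition] = newOffsets[i]
--         idString += idList[newPosition]
--
--     myStack = []
--     output = [0, ] * sum([len(dp) for dp in dotParens])
--     for index in range(len(idList)):
--         generatePairing(dotParens[index], myStack, offsets[index], output)
--     return (tuple(idString), tuple(output))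
-- ===== SOURCE B (Python) =====
-- def pairType(ids, structs):
--     idList = ids.split(',')
--     if not all(s.count(':') == 0 for s in idList):
--         if not all(s.count(':') == 1 for s in idList):
--             raise ValueError("Unsupported strand labelling.")
--         idList = [s.split(':')[1] for s in idList]
--
--     dotParens = structs.split('+')
--     lengths = [len(dp) for dp in dotParens]
--     n = len(idList)
--
--     ordering = sorted(range(n), key=idList.__getitem__)
--
--     # new offsets indexed by the ORIGINAL strand position, via one prefix-sum pass
--     offsets = [0] * n
--     acc = 0
--     for j in ordering:
--         offsets[j] = acc
--         acc += lengths[j]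
--
--     # translation array: old 1-based flat position p -> new 1-based position translate[p-1]
--     translate = []
--     for k in range(n):
--         translate.extend(range(offsets[k] + 1, offsets[k] + lengths[k] + 1))
--
--     # one stack pass over the flat structure in ORIGINAL (old) coordinates
--     flat = structs.replace('+', '')
--     pairs = []
--     stack = []
--     for p, c in enumerate(flat, 1):
--         if c == '(':
--             stack.append(p)
--         elif c == ')':
--             pairs.append((p, stack.pop()))
--         elif c != '.':
--             raise Warning('generatePairing: There is an error in the dot paren structure.')
--
--     total = len(flat)
--     output = [0] * total
--     for p, q in pairs:  # p = closing position, q = its opening partner (old coords)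
--         tp, tq = translate[p - 1], translate[q - 1]
--         output[tp - 1] = tq
--         output[tq - 1] = tp
--
--     idString = ''.join(idList[j] for j in ordering)
--     return (tuple(idString), tuple(output))
-- ===== Notes on version B (the rewrite author's own statement) =====
-- stated objective: alternative
-- what changed: Instead of interleaving per-strand parenthesis scans that write directly at permuted-offset positions, B runs one stack pass over the flat (original-order) structure collecting pairs in plain old coordinates, builds a position-translation array from a single prefix-sum pass over the sorted ordering, and scatters the collected pairs through that translation; offsets come from a running accumulator rather than repeated slice sums.
import Mathlib
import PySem

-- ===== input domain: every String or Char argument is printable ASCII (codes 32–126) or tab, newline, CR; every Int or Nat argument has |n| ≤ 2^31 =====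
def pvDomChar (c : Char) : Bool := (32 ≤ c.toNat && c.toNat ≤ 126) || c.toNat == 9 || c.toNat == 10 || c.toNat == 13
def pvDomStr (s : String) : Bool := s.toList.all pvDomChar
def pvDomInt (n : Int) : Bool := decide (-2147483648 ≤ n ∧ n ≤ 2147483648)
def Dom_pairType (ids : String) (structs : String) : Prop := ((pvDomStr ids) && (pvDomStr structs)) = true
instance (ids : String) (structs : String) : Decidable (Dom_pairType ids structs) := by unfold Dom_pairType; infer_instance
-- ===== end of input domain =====

-- B re-organizes A's interleaved per-strand scans into one flat stack pass in original
-- coordinates, a prefix-sum offset pass and a position-translation remap (objective: alternative).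

-- ===== PORT A =====
-- generatePairing: the stack's head is its top (Python appends/pops at the list's end).
-- Where Python raises (IndexError popping an empty stack; Warning on a character outside
-- '().'), inputs are excluded by Pre_pairType and this port continues as a no-op.
def pvGenAux (offset : Int) : List Char → Int → List Int → List Int → List Int × List Int
  | [], _, stack, output => (stack, output)
  | c :: cs, index, stack, output =>
    if c = '(' then
      pvGenAux offset cs (index + 1) ((offset + index) :: stack) output
    else if c = ')' then
      match stack with
      | [] => pvGenAux offset cs (index + 1) [] output
      | otherIndex :: rest =>
          pvGenAux offset cs (index + 1) rest
            (PySem.List.pySetD (PySem.List.pySetD output (offset + index - 1) otherIndex)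
              (otherIndex - 1) (offset + index))
    else
      pvGenAux offset cs (index + 1) stack output

def pairType (ids : String) (structs : String) : List String × List Int :=
  let idList0 := PySem.Chars.splitOn ids.toList [',']
  let idList :=
    if idList0.all (fun s => PySem.Chars.count s [':'] == 0) then idList0
    else if idList0.all (fun s => PySem.Chars.count s [':'] == 1) then
      idList0.map (fun s => PySem.List.pyGetD (PySem.Chars.splitOn s [':']) 1 [])
    else []   -- Python raises ValueError here; excluded by Pre_pairType
  let dotParens := PySem.Chars.splitOn structs.toList ['+']
  let N := dotParens.length
  let ordering := PySem.List.sorted (PySem.List.pyRange 0 (idList.length : Int) 1)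
      (fun i => PySem.List.pyGetD idList i []) false
  let newLengths := (PySem.List.pyRange 0 (N : Int) 1).map
      (fun i => ((PySem.List.pyGetD dotParens (PySem.List.pyGetD ordering i 0) []).length : Int))
  let newOffsets := (PySem.List.pyRange 0 (N : Int) 1).map
      (fun i => (PySem.List.slice newLengths (some 0) (some i)).sum)
  let os := (PySem.List.pyRange 0 (N : Int) 1).foldl
      (fun (st : List Int × List Char) i =>
        let newPosition := PySem.List.pyGetD ordering i 0
        (PySem.List.pySetD st.1 newPosition (PySem.List.pyGetD newOffsets i 0),
         st.2 ++ PySem.List.pyGetD idList newPosition []))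
      (List.replicate N 0, [])
  let output0 := PySem.List.pyRepeat [(0 : Int)] ((dotParens.map (fun dp => (dp.length : Int))).sum)
  let res := (PySem.List.pyRange 0 (idList.length : Int) 1).foldl
      (fun (s : List Int × List Int) index =>
        pvGenAux (PySem.List.pyGetD os.1 index 0) (PySem.List.pyGetD dotParens index []) 1 s.1 s.2)
      ([], output0)
  ((os.2).map (fun c => String.ofList [c]), res.2)

-- ===== PORT B =====
-- one stack pass over the flat original-order structure, collecting (close, open) pairs
-- in old 1-based coordinates; Python-raising branches (IndexError / Warning) are
-- excluded by Pre_pairType and continue as no-ops here.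
def pvScan : List Char → Int → List Int → List (Int × Int) → List Int × List (Int × Int)
  | [], _, stack, pairs => (stack, pairs)
  | c :: cs, p, stack, pairs =>
    if c = '(' then pvScan cs (p + 1) (p :: stack) pairs
    else if c = ')' then
      match stack with
      | [] => pvScan cs (p + 1) [] pairs
      | q :: rest => pvScan cs (p + 1) rest (pairs ++ [(p, q)])
    else pvScan cs (p + 1) stack pairs

def pairType_alt (ids : String) (structs : String) : List String × List Int :=
  let idList0 := PySem.Chars.splitOn ids.toList [',']
  let idList :=
    if idList0.all (fun s => PySem.Chars.count s [':'] == 0) then idList0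
    else if idList0.all (fun s => PySem.Chars.count s [':'] == 1) then
      idList0.map (fun s => PySem.List.pyGetD (PySem.Chars.splitOn s [':']) 1 [])
    else []   -- ValueError in Python; excluded by Pre_pairType
  let dotParens := PySem.Chars.splitOn structs.toList ['+']
  let lengths := dotParens.map (fun dp => (dp.length : Int))
  let n := idList.length
  let ordering := PySem.List.sorted (PySem.List.pyRange 0 (n : Int) 1)
      (fun i => PySem.List.pyGetD idList i []) false
  let offs := (ordering.foldl
      (fun (st : List Int × Int) j =>
        (PySem.List.pySetD st.1 j st.2, st.2 + PySem.List.pyGetD lengths j 0))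
      (List.replicate n 0, 0)).1
  let translate := (PySem.List.pyRange 0 (n : Int) 1).foldl
      (fun tr k => tr ++ PySem.List.pyRange (PySem.List.pyGetD offs k 0 + 1)
          (PySem.List.pyGetD offs k 0 + PySem.List.pyGetD lengths k 0 + 1) 1) []
  let flat := dotParens.flatten      -- ''.join(dotParens)
  let pairs := (pvScan flat 1 [] []).2
  let output0 := List.replicate flat.length (0 : Int)
  let output := pairs.foldl
      (fun out pq =>
        let tp := PySem.List.pyGetD translate (pq.1 - 1) 0
        let tq := PySem.List.pyGetD translate (pq.2 - 1) 0
        PySem.List.pySetD (PySem.List.pySetD out (tp - 1) tq) (tq - 1) tp)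
      output0
  let idChars := (ordering.map (fun j => PySem.List.pyGetD idList j [])).flatten
  (idChars.map (fun c => String.ofList [c]), output)

-- ===== PRECONDITION & SPEC =====
-- Pre_ admits exactly the inputs on which the Python A returns normally: a uniform strand
-- labelling (else ValueError), as many ids as dot-paren pieces (else IndexError), only
-- '(', ')', '.' structure characters (else Warning), and no prefix of the original-order
-- concatenation closing more pairs than it opened (else IndexError: pop from empty list).
def Pre_pairType (ids : String) (structs : String) : Prop :=
  ((PySem.Chars.splitOn ids.toList [',']).all (fun s => PySem.Chars.count s [':'] == 0) = true ∨
   (PySem.Chars.splitOn ids.toList [',']).all (fun s => PySem.Chars.count s [':'] == 1) = true)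
  ∧ (PySem.Chars.splitOn ids.toList [',']).length
      = (PySem.Chars.splitOn structs.toList ['+']).length
  ∧ (structs.toList.all (fun c => c == '(' || c == ')' || c == '.' || c == '+')) = true
  ∧ ((List.range ((PySem.Chars.splitOn structs.toList ['+']).flatten.length + 1)).all
      (fun i => decide (((PySem.Chars.splitOn structs.toList ['+']).flatten.take i).count ')'
        ≤ ((PySem.Chars.splitOn structs.toList ['+']).flatten.take i).count '('))) = true

instance (ids : String) (structs : String) : Decidable (Pre_pairType ids structs) := by
  unfold Pre_pairType; infer_instance

def pvWitness_pairType : String × String := ("b,a", "((.+.))")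

def Spec_pairType (ids : String) (structs : String) (out : List String × List Int) : Prop :=
  out = pairType_alt ids structs
instance (ids : String) (structs : String) (out : List String × List Int) :
    Decidable (Spec_pairType ids structs out) := by unfold Spec_pairType; infer_instance

-- ===== CLAIM (what is proved, stated in full; the proofs are below) =====
def Claim_equal_pairType : Prop := ∀ (ids : String) (structs : String),
  Dom_pairType ids structs → Pre_pairType ids structs →
    Spec_pairType ids structs (pairType ids structs)

-- ===== LEMMAS AND PROOFS =====

def pvBlockOK (T : Int → Int) : Int → List (List Char × Int) → Prop
  | _, [] => True
  | d, (cs, o) :: ks =>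
      (∀ j : Int, 0 ≤ j → j < (cs.length : Int) → T (d + 1 + j) = o + 1 + j)
      ∧ pvBlockOK T (d + cs.length) ks

def pvPS (lens : List Int) : Int → List Int → List Int
  | _, [] => []
  | a, j :: tl => a :: pvPS lens (a + PySem.List.pyGetD lens j 0) tl

def pvWriteAll (ps : List (Int × Int)) (out : List Int) : List Int :=
  ps.foldl (fun o pq =>
    PySem.List.pySetD (PySem.List.pySetD o (pq.1 - 1) pq.2) (pq.2 - 1) pq.1) out
theorem pvScan_acc (cs : List Char) : ∀ (p : Int) (st : List Int) (ps : List (Int × Int)),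
    pvScan cs p st ps = ((pvScan cs p st []).1, ps ++ (pvScan cs p st []).2) := by
  induction cs with
  | nil => intro p st ps; simp [pvScan]
  | cons c cs ih =>
    intro p st ps
    by_cases h1 : c = '('
    · simp only [pvScan, if_pos h1]
      exact ih (p+1) (p :: st) ps
    · by_cases h2 : c = ')'
      · cases st with
        | nil =>
          simp only [pvScan, if_neg h1, if_pos h2]
          exact ih (p+1) [] ps
        | cons q rest =>
          simp only [pvScan, if_neg h1, if_pos h2, List.nil_append]
          rw [ih (p+1) rest (ps ++ [(p,q)]), ih (p+1) rest [(p,q)]]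
          simp
      · simp only [pvScan, if_neg h1, if_neg h2]
        exact ih (p+1) st ps

theorem pvGenAux_eq_scan (cs : List Char) :
    ∀ (o idx : Int) (st out : List Int),
    pvGenAux o cs idx st out
      = ((pvScan cs (o + idx) st []).1, pvWriteAll (pvScan cs (o + idx) st []).2 out) := by
  induction cs with
  | nil => intro o idx st out; simp [pvGenAux, pvScan, pvWriteAll]
  | cons c cs ih =>
    intro o idx st out
    have harith : o + (idx + 1) = (o + idx) + 1 := by ring
    by_cases h1 : c = '('
    · simp only [pvGenAux, pvScan, if_pos h1]
      rw [ih, harith]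
    · by_cases h2 : c = ')'
      · cases st with
        | nil =>
          simp only [pvGenAux, pvScan, if_neg h1, if_pos h2]
          rw [ih, harith]
        | cons q rest =>
          simp only [pvGenAux, pvScan, if_neg h1, if_pos h2, List.nil_append]
          rw [ih, harith, pvScan_acc cs ((o+idx)+1) rest [(o + idx, q)]]
          simp only [pvWriteAll, List.singleton_append, List.foldl_cons]
      · simp only [pvGenAux, pvScan, if_neg h1, if_neg h2]
        rw [ih, harith]

theorem pvScan_append (xs : List Char) : ∀ (ys : List Char) (p : Int) (st : List Int)
    (ps : List (Int × Int)),
    pvScan (xs ++ ys) p st ps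
      = pvScan ys (p + xs.length) (pvScan xs p st ps).1 (pvScan xs p st ps).2 := by
  induction xs with
  | nil => intro ys p st ps; simp [pvScan]
  | cons c cs ih =>
    intro ys p st ps
    have harith : p + ((c :: cs).length : Int) = (p + 1) + (cs.length : Int) := by
      simp only [List.length_cons]; push_cast; ring
    by_cases h1 : c = '('
    · simp only [List.cons_append, pvScan, if_pos h1]; rw [ih, ← harith]
    · by_cases h2 : c = ')'
      · cases st with
        | nil => simp only [List.cons_append, pvScan, if_neg h1, if_pos h2]; rw [ih, ← harith]
        | cons q rest => simp only [List.cons_append, pvScan, if_neg h1, if_pos h2]; rw [ih, ← harith]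
      · simp only [List.cons_append, pvScan, if_neg h1, if_neg h2]; rw [ih, ← harith]

theorem pvScan_map (cs : List Char) : ∀ (a b : Int) (T : Int → Int) (st : List Int)
    (ps : List (Int × Int)),
    (∀ j : Int, 0 ≤ j → j < (cs.length : Int) → T (b + j) = a + j) →
    pvScan cs a (st.map T) (ps.map (fun pq => (T pq.1, T pq.2)))
      = ((pvScan cs b st ps).1.map T,
         (pvScan cs b st ps).2.map (fun pq => (T pq.1, T pq.2))) := by
  induction cs with
  | nil => intro a b T st ps hT; simp [pvScan]
  | cons c cs ih =>
    intro a b T st ps hT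
    have h0 : T b = a := by
      have := hT 0 le_rfl (by simp only [List.length_cons]; push_cast; omega)
      simpa using this
    have hT' : ∀ j : Int, 0 ≤ j → j < (cs.length : Int) → T ((b + 1) + j) = (a + 1) + j := by
      intro j hj hj2
      have := hT (j + 1) (by omega) (by simp only [List.length_cons]; push_cast; omega)
      have e1 : b + (j + 1) = (b + 1) + j := by ring
      have e2 : a + (j + 1) = (a + 1) + j := by ring
      rw [e1, e2] at this; exact this
    by_cases h1 : c = '('
    · simp only [pvScan, if_pos h1]
      have hst : (a :: st.map T) = (b :: st).map T := by simp [h0]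
      rw [hst]
      exact ih (a+1) (b+1) T (b :: st) ps hT'
    · by_cases h2 : c = ')'
      · cases st with
        | nil =>
          simp only [pvScan, if_neg h1, if_pos h2, List.map_nil]
          exact ih (a+1) (b+1) T [] ps hT'
        | cons q rest =>
          simp only [pvScan, if_neg h1, if_pos h2, List.map_cons]
          have hps : ps.map (fun pq => (T pq.1, T pq.2)) ++ [(a, T q)]
              = (ps ++ [(b, q)]).map (fun pq => (T pq.1, T pq.2)) := by simp [h0]
          rw [hps]
          exact ih (a+1) (b+1) T rest (ps ++ [(b,q)]) hT'
      · simp only [pvScan, if_neg h1, if_neg h2]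
        exact ih (a+1) (b+1) T st ps hT'

theorem pvStrandLoop (T : Int → Int) (out : List Int) :
    ∀ (ks : List (List Char × Int)) (d : Int) (st : List Int) (ps : List (Int × Int)),
    pvBlockOK T d ks →
    ks.foldl (fun (s : List Int × List Int) k => pvGenAux k.2 k.1 1 s.1 s.2)
      (st.map T, pvWriteAll (ps.map (fun pq => (T pq.1, T pq.2))) out)
    = ((pvScan (ks.map Prod.fst).flatten (d + 1) st ps).1.map T,
       pvWriteAll ((pvScan (ks.map Prod.fst).flatten (d + 1) st ps).2.map
         (fun pq => (T pq.1, T pq.2))) out) := by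
  intro ks
  induction ks with
  | nil => intro d st ps _; simp [pvScan]
  | cons k ks ih =>
    obtain ⟨cs, o⟩ := k
    intro d st ps hOK
    obtain ⟨hT, hOK'⟩ := hOK
    simp only [List.foldl_cons, List.map_cons, List.flatten_cons]
    rw [pvGenAux_eq_scan]
    have hmap0 := pvScan_map cs (o+1) (d+1) T st [] hT
    simp only [List.map_nil] at hmap0
    rw [hmap0]
    -- combine writeAll composition
    have hw : pvWriteAll ((pvScan cs (d+1) st []).2.map (fun pq => (T pq.1, T pq.2)))
        (pvWriteAll (ps.map (fun pq => (T pq.1, T pq.2))) out)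
        = pvWriteAll ((ps ++ (pvScan cs (d+1) st []).2).map (fun pq => (T pq.1, T pq.2))) out := by
      simp [pvWriteAll, List.foldl_append]
    rw [hw]
    have hacc := pvScan_acc cs (d+1) st ps
    rw [pvScan_append]
    rw [hacc]
    have harith : d + 1 + (cs.length : Int) = (d + (cs.length : Int)) + 1 := by ring
    rw [harith]
    exact ih (d + cs.length) (pvScan cs (d+1) st []).1 (ps ++ (pvScan cs (d+1) st []).2) hOK'

theorem pvOffsB (lens : List Int) : ∀ (ord : List Int) (off0 : List Int) (a : Int),
    (ord.foldl (fun (st : List Int × Int) j =>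
        (PySem.List.pySetD st.1 j st.2, st.2 + PySem.List.pyGetD lens j 0)) (off0, a)).1
    = (ord.zip (pvPS lens a ord)).foldl
        (fun off p => PySem.List.pySetD off p.1 p.2) off0 := by
  intro ord
  induction ord with
  | nil => intro off0 a; simp [pvPS]
  | cons j tl ih =>
    intro off0 a
    simp only [List.foldl_cons, pvPS, List.zip_cons_cons]
    exact ih (PySem.List.pySetD off0 j a) (a + PySem.List.pyGetD lens j 0)

theorem pvPS_eq_map (lens : List Int) : ∀ (ord : List Int) (a : Int),
    pvPS lens a ord = (List.range ord.length).map
      (fun i => a + ((ord.take i).map (fun j => PySem.List.pyGetD lens j 0)).sum) := by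
  intro ord
  induction ord with
  | nil => intro a; simp [pvPS]
  | cons j tl ih =>
    intro a
    simp only [pvPS, List.length_cons, List.range_succ_eq_map, List.map_cons, List.map_map]
    refine List.cons_eq_cons.mpr ⟨by simp, ?_⟩
    rw [ih (a + PySem.List.pyGetD lens j 0)]
    apply List.map_congr_left
    intro i _
    simp [List.take_succ_cons]
    ring

theorem pvBlockOK_translate : ∀ (dps : List (List Char)) (offsl : List Int) (pre : List Int),
    dps.length = offsl.length →
    pvBlockOK (fun x => PySem.List.pyGetD
        (pre ++ (dps.zip offsl).flatMap
          (fun k => PySem.List.pyRange (k.2 + 1) (k.2 + (k.1.length : Int) + 1) 1)) (x - 1) 0)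
      (pre.length : Int) (dps.zip offsl) := by
  intro dps
  induction dps with
  | nil => intro offsl pre h; simp [pvBlockOK]
  | cons cs dps ih =>
    intro offsl pre h
    cases offsl with
    | nil => simp at h
    | cons o offsl =>
      simp only [List.zip_cons_cons, List.flatMap_cons, pvBlockOK]
      have hlenblk : (PySem.List.pyRange (o + 1) (o + (cs.length : Int) + 1) 1).length
          = cs.length := by
        rw [PySem.List.length_pyRange_one]; omega
      constructor
      · intro j hj hj2
        have hidx : ((pre.length : Int) + 1 + j - 1) = ((pre.length + j.toNat : Nat) : Int) := by
          push_cast; omega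
        rw [hidx, PySem.List.pyGetD_natCast]
        have hjlt : j.toNat < cs.length := by omega
        have hbound : pre.length + j.toNat
            < (pre ++ ((PySem.List.pyRange (o + 1) (o + (cs.length : Int) + 1) 1) ++
                (dps.zip offsl).flatMap (fun k =>
                  PySem.List.pyRange (k.2 + 1) (k.2 + (k.1.length : Int) + 1) 1))).length := by
          simp [hlenblk]; omega
        rw [List.getD_eq_getElem _ _ hbound]
        rw [List.getElem_append_right (by omega)]
        have hlt2 : pre.length + j.toNat - pre.length
            < (PySem.List.pyRange (o + 1) (o + (cs.length : Int) + 1) 1).length := by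
          rw [hlenblk]; omega
        rw [List.getElem_append_left hlt2]
        rw [PySem.List.getElem_pyRange_one]
        have : (pre.length + j.toNat - pre.length) = j.toNat := by omega
        rw [this]
        omega
      · have hpre : (pre ++ ((PySem.List.pyRange (o + 1) (o + (cs.length : Int) + 1) 1) ++
            (dps.zip offsl).flatMap (fun k =>
              PySem.List.pyRange (k.2 + 1) (k.2 + (k.1.length : Int) + 1) 1)))
            = ((pre ++ PySem.List.pyRange (o + 1) (o + (cs.length : Int) + 1) 1) ++
              (dps.zip offsl).flatMap (fun k =>
                PySem.List.pyRange (k.2 + 1) (k.2 + (k.1.length : Int) + 1) 1)) := by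
          simp [List.append_assoc]
        rw [hpre]
        have hlen : ((pre.length : Int) + (cs.length : Int))
            = (((pre ++ PySem.List.pyRange (o + 1) (o + (cs.length : Int) + 1) 1).length : Nat) : Int) := by
          simp [hlenblk]
        rw [hlen]
        exact ih offsl (pre ++ PySem.List.pyRange (o + 1) (o + (cs.length : Int) + 1) 1) (by simpa using h)

theorem pvList_eq_range_map {α : Type} (xs : List α) (d : α) :
    xs = (List.range xs.length).map (fun i => xs.getD i d) := by
  apply List.ext_getElem
  · simp
  · intro i h1 h2
    simp at h1
    simp [List.getD_eq_getElem?_getD, List.getElem?_eq_getElem h1]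

theorem pvZip_eq_range_map {α β : Type} (xs : List α) (ys : List β) (d1 : α) (d2 : β)
    (h : xs.length = ys.length) :
    xs.zip ys = (List.range xs.length).map (fun i => (xs.getD i d1, ys.getD i d2)) := by
  apply List.ext_getElem
  · simp [h]
  · intro i h1 h2
    simp [h] at h1
    have h1' : i < xs.length := by omega
    simp [List.getD_eq_getElem?_getD, List.getElem?_eq_getElem h1', List.getElem?_eq_getElem (h ▸ h1')]

theorem pvSetFold_length (l : List (Int × Int)) : ∀ (off0 : List Int),
    (l.foldl (fun off p => PySem.List.pySetD off p.1 p.2) off0).length = off0.length := by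
  induction l with
  | nil => intro off0; rfl
  | cons p tl ih => intro off0; simp [List.foldl_cons, ih, PySem.List.length_pySetD]

theorem pvWriteAll_nil (out : List Int) : pvWriteAll [] out = out := rfl

theorem pvSumCast (l : List (List Char)) :
    (l.map (fun dp => ((dp.length : Nat) : Int))).sum = (((l.map List.length).sum : Nat) : Int) := by
  induction l with
  | nil => simp
  | cons x tl ih => simp [ih]

theorem pairTypes_eq (ids structs : String)
    (hLab : (∀ s ∈ PySem.Chars.splitOn ids.toList [','], PySem.Chars.count s [':'] = 0) ∨
      (∀ s ∈ PySem.Chars.splitOn ids.toList [','], PySem.Chars.count s [':'] = 1))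
    (hLen : (PySem.Chars.splitOn ids.toList [',']).length
        = (PySem.Chars.splitOn structs.toList ['+']).length) :
    pairType ids structs = pairType_alt ids structs := by
  simp only [pairType, pairType_alt]
  set idList0 := PySem.Chars.splitOn ids.toList [','] with hid0
  set dotParens := PySem.Chars.splitOn structs.toList ['+'] with hdp
  set idList := (if idList0.all (fun s => PySem.Chars.count s [':'] == 0) then idList0
    else if idList0.all (fun s => PySem.Chars.count s [':'] == 1) then
      idList0.map (fun s => PySem.List.pyGetD (PySem.Chars.splitOn s [':']) 1 [])
    else []) with hidL
  have hnn : idList.length = idList0.length := by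
    rw [hidL]; split_ifs with h1 h2
    · rfl
    · simp
    · exfalso; rcases hLab with h | h
      · apply h1; simp only [List.all_eq_true]; intro s hs; simpa using h s hs
      · apply h2; simp only [List.all_eq_true]; intro s hs; simpa using h s hs
  have hN : idList.length = dotParens.length := by rw [hnn]; exact hLen
  rw [← hN]
  set ordering := PySem.List.sorted (PySem.List.pyRange 0 (idList.length : Int) 1)
      (fun i => PySem.List.pyGetD idList i []) false with hord
  set lengthsB := dotParens.map (fun dp => ((dp.length : Nat) : Int)) with hlensB
  have hordlen : ordering.length = idList.length := by
    rw [hord, PySem.List.length_sorted, PySem.List.length_pyRange_one]; simp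
  have hordmem : ∀ j ∈ ordering, 0 ≤ j ∧ j < (idList.length : Int) := by
    intro j hj
    rw [hord] at hj
    have := (PySem.List.sorted_perm _ _ _).mem_iff.mp hj
    exact PySem.List.mem_pyRange_one.mp this
  set newLengths := (PySem.List.pyRange 0 (idList.length : Int) 1).map
      (fun i => ((PySem.List.pyGetD dotParens (PySem.List.pyGetD ordering i 0) []).length : Int)) with hnewL
  set newOffsets := (PySem.List.pyRange 0 (idList.length : Int) 1).map
      (fun i => (PySem.List.slice newLengths (some 0) (some i)).sum) with hnewO
  have hlen_getD : ∀ j : Int, 0 ≤ j → j < (idList.length : Int) →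
      PySem.List.pyGetD lengthsB j 0 = ((PySem.List.pyGetD dotParens j []).length : Int) := by
    intro j h0 hlt
    have hjN : j.toNat < dotParens.length := by omega
    have hjL : j < (lengthsB.length : Int) := by rw [hlensB]; simp; omega
    have hjD : j < (dotParens.length : Int) := by exact_mod_cast hN ▸ hlt
    rw [PySem.List.pyGetD_eq_getElem lengthsB 0 h0 hjL,
        PySem.List.pyGetD_eq_getElem dotParens [] h0 hjD]
    simp [hlensB]
  have hnewL_eq : newLengths = ordering.map (fun j => PySem.List.pyGetD lengthsB j 0) := by
    rw [hnewL, PySem.List.pyRange_zero_natCast, List.map_map]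
    conv_rhs => rw [pvList_eq_range_map ordering (0 : Int), List.map_map, hordlen]
    apply List.map_congr_left
    intro i hi
    simp only [Function.comp_def, PySem.List.pyGetD_natCast]
    have hmem : ordering.getD i 0 ∈ ordering := by
      have hilt : i < ordering.length := by rw [hordlen]; exact List.mem_range.mp hi
      rw [List.getD_eq_getElem _ _ hilt]; exact List.getElem_mem _
    obtain ⟨h0, hlt⟩ := hordmem _ hmem
    rw [hlen_getD _ h0 hlt]
  have hlenON : ordering.length = newOffsets.length := by
    rw [hordlen, hnewO, List.length_map, PySem.List.length_pyRange_one]; simp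
  have hnewO_eq : newOffsets = pvPS lengthsB 0 ordering := by
    rw [pvPS_eq_map, hnewO, PySem.List.pyRange_zero_natCast, List.map_map, hordlen]
    apply List.map_congr_left
    intro i hi
    simp only [Function.comp_def]
    rw [PySem.List.slice_zero_start, PySem.List.slice_to_natCast]
    rw [hnewL_eq]
    simp [List.map_take]
  set osA := (PySem.List.pyRange 0 (idList.length : Int) 1).foldl
      (fun (st : List Int × List Char) i =>
        (PySem.List.pySetD st.1 (PySem.List.pyGetD ordering i 0) (PySem.List.pyGetD newOffsets i 0),
         st.2 ++ PySem.List.pyGetD idList (PySem.List.pyGetD ordering i 0) []))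
      (List.replicate idList.length 0, []) with hosA
  have hsplit : osA = ((PySem.List.pyRange 0 (idList.length : Int) 1).foldl
        (fun s1 i => PySem.List.pySetD s1 (PySem.List.pyGetD ordering i 0)
          (PySem.List.pyGetD newOffsets i 0)) (List.replicate idList.length 0),
      (PySem.List.pyRange 0 (idList.length : Int) 1).foldl
        (fun s2 i => s2 ++ PySem.List.pyGetD idList (PySem.List.pyGetD ordering i 0) []) []) := by
    rw [hosA]
    exact PySem.List.foldl_prod_mk
      (fun s1 (i : Int) => PySem.List.pySetD s1 (PySem.List.pyGetD ordering i 0)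
        (PySem.List.pyGetD newOffsets i 0))
      (fun s2 (i : Int) => s2 ++ PySem.List.pyGetD idList (PySem.List.pyGetD ordering i 0) [])
      (PySem.List.pyRange 0 (idList.length : Int) 1) (List.replicate idList.length 0) []
  have hosA1 : osA.1 = (ordering.zip newOffsets).foldl
      (fun off p => PySem.List.pySetD off p.1 p.2) (List.replicate idList.length 0) := by
    rw [hsplit]
    rw [pvZip_eq_range_map ordering newOffsets 0 0 hlenON, hordlen, List.foldl_map,
        PySem.List.pyRange_zero_natCast, List.foldl_map]
    simp only [PySem.List.pyGetD_natCast]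
  have hosA2 : osA.2 = (ordering.map (fun j => PySem.List.pyGetD idList j [])).flatten := by
    rw [hsplit]
    rw [PySem.List.pyRange_zero_natCast, List.foldl_map, PySem.List.foldl_append_eq_flatMap,
        List.nil_append]
    rw [← List.flatMap_def]
    conv_rhs => rw [pvList_eq_range_map ordering (0 : Int), hordlen]
    rw [List.flatMap_map]
    simp only [PySem.List.pyGetD_natCast]
    rw [List.flatMap_map]
  -- offsets agree
  have hoffsB_eq : (ordering.foldl
      (fun (st : List Int × Int) j =>
        (PySem.List.pySetD st.1 j st.2, st.2 + PySem.List.pyGetD lengthsB j 0))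
      (List.replicate idList.length 0, 0)).1
      = (ordering.zip (pvPS lengthsB 0 ordering)).foldl
        (fun off p => PySem.List.pySetD off p.1 p.2) (List.replicate idList.length 0) :=
    pvOffsB lengthsB ordering (List.replicate idList.length 0) 0
  have hoffs_eq : (ordering.foldl
      (fun (st : List Int × Int) j =>
        (PySem.List.pySetD st.1 j st.2, st.2 + PySem.List.pyGetD lengthsB j 0))
      (List.replicate idList.length 0, 0)).1 = osA.1 := by
    rw [hoffsB_eq, hosA1, hnewO_eq]
  rw [hoffs_eq]
  set translate := (PySem.List.pyRange 0 (idList.length : Int) 1).foldl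
      (fun tr k => tr ++ PySem.List.pyRange (PySem.List.pyGetD osA.1 k 0 + 1)
          (PySem.List.pyGetD osA.1 k 0 + PySem.List.pyGetD lengthsB k 0 + 1) 1) [] with htr
  have hlenDO : dotParens.length = osA.1.length := by
    rw [hosA1, pvSetFold_length]; simp [← hN]
  have htr_eq : translate = (dotParens.zip osA.1).flatMap
      (fun k => PySem.List.pyRange (k.2 + 1) (k.2 + (k.1.length : Int) + 1) 1) := by
    rw [htr, PySem.List.pyRange_zero_natCast, List.foldl_map,
        PySem.List.foldl_append_eq_flatMap, List.nil_append]
    conv_rhs => rw [pvZip_eq_range_map dotParens osA.1 [] 0 hlenDO]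
    rw [List.flatMap_map, ← hN]
    rw [List.flatMap_def, List.flatMap_def]
    refine congrArg List.flatten (List.map_congr_left ?_)
    intro i hi
    have hiN : i < idList.length := List.mem_range.mp hi
    simp only [PySem.List.pyGetD_natCast]
    have hg : lengthsB.getD i 0 = ((dotParens.getD i []).length : Int) := by
      have h2 := hlen_getD (i : Int) (by positivity) (by exact_mod_cast hiN)
      simpa using h2
    rw [hg]
  have hout0 : PySem.List.pyRepeat [(0 : Int)] lengthsB.sum
      = List.replicate dotParens.flatten.length (0 : Int) := by
    rw [PySem.List.pyRepeat_singleton, hlensB, pvSumCast, Int.toNat_natCast, List.length_flatten]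
  have hres2 : (PySem.List.pyRange 0 (idList.length : Int) 1).foldl
      (fun (s : List Int × List Int) index =>
        pvGenAux (PySem.List.pyGetD osA.1 index 0) (PySem.List.pyGetD dotParens index []) 1 s.1 s.2)
      ([], PySem.List.pyRepeat [(0 : Int)] lengthsB.sum)
      = (dotParens.zip osA.1).foldl (fun s k => pvGenAux k.2 k.1 1 s.1 s.2)
        ([], List.replicate dotParens.flatten.length (0 : Int)) := by
    rw [hout0]
    conv_rhs => rw [pvZip_eq_range_map dotParens osA.1 [] 0 hlenDO]
    rw [List.foldl_map, ← hN, PySem.List.pyRange_zero_natCast, List.foldl_map]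
    simp only [PySem.List.pyGetD_natCast]
  have hBOK : pvBlockOK (fun x => PySem.List.pyGetD translate (x - 1) 0) 0 (dotParens.zip osA.1) := by
    have h := pvBlockOK_translate dotParens osA.1 [] hlenDO
    simp only [List.nil_append, List.length_nil, Nat.cast_zero] at h
    rw [← htr_eq] at h
    exact h
  have hmain := pvStrandLoop (fun x => PySem.List.pyGetD translate (x - 1) 0)
      (List.replicate dotParens.flatten.length (0 : Int)) (dotParens.zip osA.1) 0 [] [] hBOK
  simp only [List.map_nil, zero_add, pvWriteAll_nil,
    List.map_fst_zip (le_of_eq hlenDO)] at hmain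
  rw [hres2, hmain]
  apply Prod.ext
  · simp only []
    rw [hosA2]
  · simp only [pvWriteAll, List.foldl_map]

-- ===== VERDICT (by name: the statement is the Claim_ definition above) =====
theorem pairType_spec : Claim_equal_pairType := by
  intro ids structs hDom hPre
  unfold Spec_pairType
  obtain ⟨hLab, hLen, _, _⟩ := hPre
  have hLab' : (∀ s ∈ PySem.Chars.splitOn ids.toList [','], PySem.Chars.count s [':'] = 0) ∨
      (∀ s ∈ PySem.Chars.splitOn ids.toList [','], PySem.Chars.count s [':'] = 1) := by
    rcases hLab with h | h
    · left; intro s hs; simpa using List.all_eq_true.mp h s hs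
    · right; intro s hs; simpa using List.all_eq_true.mp h s hs
  exact pairTypes_eq ids structs hLab' hLen
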